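-- pv_equiv track=rewrite | github.com/m9810223/advent-of-code-python | 2022/01/__init__.py | new_part1
-- ===== SOURCE A (Python) =====
-- class Top:
--     def __init__(self, k: int = 1):
--         self._k = k
--         self._top = [0] * k  # left > right
--
--     def push(self, val: int):
--         self._top.append(val)
--         for i in range(self._k - 1, -1, -1):
--             if self._top[i] >= self._top[i + 1]:
--                 break
--             self._top[i : i + 2] = self._top[i + 1], self._top[i]
--         self._top.pop()
--
--     @property
--     def top(self):
--         return self._top[: self._k]
--
-- def new_part1(inputs):
--     t = Top(1)
--     acc = 0
--     for calory in inputs: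
--         if calory is None:
--             t.push(acc)
--             acc = 0
--             continue
--         acc += calory
--     t.push(acc)
--     return sum(t.top)
-- ===== SOURCE B (Python) =====
-- def new_part1(inputs):
--     best = 0
--     acc = 0
--     for calory in inputs:
--         if calory is None:
--             best = max(best, acc)
--             acc = 0
--         else:
--             acc += calory
--     return max(best, acc)
-- ===== Notes on version B (the rewrite author's own statement) =====
-- stated objective: simpler
-- what changed: Replaces the Top class (a sorted top-k list with append/bubble/pop pushes) by a single scalar running maximum updated with max().
import Mathlib
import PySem

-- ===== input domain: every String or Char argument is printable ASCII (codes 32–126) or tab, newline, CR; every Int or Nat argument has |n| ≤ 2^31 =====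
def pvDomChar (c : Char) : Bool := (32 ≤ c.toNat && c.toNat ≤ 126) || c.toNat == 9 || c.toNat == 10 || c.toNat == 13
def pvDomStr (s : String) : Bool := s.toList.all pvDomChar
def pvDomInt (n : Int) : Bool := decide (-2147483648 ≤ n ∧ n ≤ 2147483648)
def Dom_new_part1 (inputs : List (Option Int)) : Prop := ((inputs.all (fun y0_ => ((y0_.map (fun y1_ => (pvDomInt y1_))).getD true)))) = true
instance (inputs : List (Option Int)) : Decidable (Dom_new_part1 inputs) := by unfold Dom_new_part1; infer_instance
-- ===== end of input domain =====

-- B replaces A's Top class (sorted top-k list maintained by append/bubble/pop) with a single scalar running maximum; simpler, same cost.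


-- ===== PORT A =====
-- Top.push's bubble loop: `for i in range(k-1, -1, -1): if top[i] >= top[i+1]: break; swap slice`.
-- Indices are always in range in every call A makes (len(_top) = k+1 inside push), so pyGetD/take/drop
-- with i.toNat are exact here (i ≥ 0 for every i produced by the range).
def topPushLoop (top : List Int) : List Int → List Int
  | [] => top
  | i :: rest =>
    let a := PySem.List.pyGetD top i 0
    let b := PySem.List.pyGetD top (i + 1) 0
    if a ≥ b then top
    else topPushLoop (top.take i.toNat ++ [b, a] ++ top.drop (i.toNat + 2)) rest

-- Top.push: append val, bubble, then pop the last element (list nonempty, so dropLast is exact).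
def topPush (k : Int) (top : List Int) (val : Int) : List Int :=
  (topPushLoop (top ++ [val]) (PySem.List.pyRange (k - 1) (-1) (-1))).dropLast

def new_part1 (inputs : List (Option Int)) : Int :=
  let s := inputs.foldl
    (fun (st : List Int × Int) c =>
      match c with
      | none => (topPush 1 st.1 st.2, 0)
      | some v => (st.1, st.2 + v))
    (List.replicate 1 0, 0)
  let top := topPush 1 s.1 s.2
  (top.take 1).sum    -- sum(t.top) with t.top = _top[:k], k = 1

-- ===== PORT B =====
def new_part1_alt (inputs : List (Option Int)) : Int :=
  let s := inputs.foldl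
    (fun (st : Int × Int) c =>
      match c with
      | none => (max st.1 st.2, 0)
      | some v => (st.1, st.2 + v))
    (0, 0)
  max s.1 s.2

-- ===== PRECONDITION & SPEC =====
def Spec_new_part1 (inputs : List (Option Int)) (out : Int) : Prop := out = new_part1_alt inputs
instance (inputs : List (Option Int)) (out : Int) : Decidable (Spec_new_part1 inputs out) := by unfold Spec_new_part1; infer_instance

-- ===== CLAIM (what is proved, stated in full; the proofs are below) =====
def Claim_equal_new_part1 : Prop := ∀ (inputs : List (Option Int)), Dom_new_part1 inputs → Spec_new_part1 inputs (new_part1 inputs)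

-- ===== LEMMAS AND PROOFS =====

-- A's push with k = 1 on a singleton list keeps the maximum of the old element and the pushed value.
lemma topPush_one (b v : Int) : topPush 1 [b] v = [max b v] := by
  simp only [topPush]
  have hr : PySem.List.pyRange (1 - 1) (-1) (-1) = [0] := by decide
  rw [hr]
  simp only [topPushLoop, PySem.List.pyGetD, PySem.List.pyGet?, PySem.List.pyIdx?]
  by_cases h : v ≤ b
  · simp [h, max_eq_left h]
  · simp [h, max_eq_right (le_of_lt (lt_of_not_ge h)), topPushLoop, PySem.List.pyGetD]

lemma fold_eq (inputs : List (Option Int)) : ∀ (b acc : Int),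
    inputs.foldl
      (fun (st : List Int × Int) c =>
        match c with
        | none => (topPush 1 st.1 st.2, 0)
        | some v => (st.1, st.2 + v)) ([b], acc)
    = (([(inputs.foldl
        (fun (st : Int × Int) c =>
          match c with
          | none => (max st.1 st.2, 0)
          | some v => (st.1, st.2 + v)) (b, acc)).1],
        (inputs.foldl
        (fun (st : Int × Int) c =>
          match c with
          | none => (max st.1 st.2, 0)
          | some v => (st.1, st.2 + v)) (b, acc)).2)) := by
  induction inputs with
  | nil => intro b acc; simp
  | cons c rest ih =>
    intro b acc
    cases c with
    | none => simpa [List.foldl, topPush_one] using ih (max b acc) 0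
    | some v => simpa [List.foldl] using ih b (acc + v)

-- ===== VERDICT (by name: the statement is the Claim_ definition above) =====
theorem new_part1_spec : Claim_equal_new_part1 := by
  intro inputs _
  show new_part1 inputs = new_part1_alt inputs
  simp only [new_part1, new_part1_alt, List.replicate]
  rw [fold_eq inputs 0 0, topPush_one]
  simp
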